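-- pv_equiv track=rewrite | github.com/rainiyh/alphabetic-cipher | cracker.py | hashWord
-- ===== SOURCE A (Python) =====
-- def hashWord(word):
--
--     #Translates a word into numbers (starting with 0) where each number uniquely represents a letter in the given word
--     #For example: ABC would become 012 - 0 was assigned to 'A', 1 to 'B' and 2 to 'C'
--     #Therefore ABCA would become 0120 - since the 'A' at index 0 already exists in the dictionary by the time the program looks at the 'A'
--     #at index 3, the second 'A' is assigned the same number as the previous 'A'
--
--     #some more examples:
--     #ABCD becomes 0123 --- 0 = A | 1 = B | 2 = C | 3 = D
--
--     #ELEPHANT becomes 01023456 --- 0 = E | 1 = L | 0 = E (again) | 2 = P | 3 = H | 4 = A | 5 = N | 6 = T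
--
--     #KRUTARTH becomes 01234135 --- 0 = K | 1 = R | 2 = U | 3 = T | 4 = A | 1 = R (again) | 3 = T (again) | 5 = H
--
--     exists = {}
--     out = []
--     count = 0
--
--     for ch in word:
--         if ch not in exists:
--             exists[ch] = str(count)
--             count += 1
--         out.append(exists[ch])
--     return ''.join(out)
-- ===== SOURCE B (Python) =====
-- def hashWord(word):
--     # Each letter's code is the number of distinct letters that appear strictly
--     # before its FIRST occurrence: compute it per character from the prefix
--     # preceding word.index(ch), with no rank table or counter at all.
--     return ''.join(str(len(set(word[:word.index(ch)]))) for ch in word)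
-- ===== Notes on version B (the rewrite author's own statement) =====
-- stated objective: alternative
-- what changed: Replaces A's fused single pass (growing dict + counter + output accumulator) by a per-character closed form: each letter's code is the count of distinct letters in the prefix before its first occurrence, computed independently via word.index and set(), with no rank table or counter maintained.
import Mathlib
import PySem

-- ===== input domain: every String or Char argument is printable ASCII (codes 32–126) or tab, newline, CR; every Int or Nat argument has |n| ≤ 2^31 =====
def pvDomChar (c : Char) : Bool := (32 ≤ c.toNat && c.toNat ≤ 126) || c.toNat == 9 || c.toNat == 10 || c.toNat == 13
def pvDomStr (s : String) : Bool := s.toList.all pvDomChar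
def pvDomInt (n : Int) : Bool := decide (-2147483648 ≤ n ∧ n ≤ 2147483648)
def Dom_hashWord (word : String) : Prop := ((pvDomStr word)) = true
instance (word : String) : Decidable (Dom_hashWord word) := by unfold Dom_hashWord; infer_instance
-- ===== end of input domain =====

-- B replaces A's fused dict+counter+output pass by a per-character closed form:
-- each letter's code is the number of distinct letters before its first occurrence.

-- ===== PORT A =====
-- state: (exists, out, count); the guaranteed-present lookup exists[ch] is getD with a dead "" default
def hashWord (word : String) : String :=
  let st := word.toList.foldl
    (fun (st : PySem.Dict Char String × List String × Int) ch =>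
      let ec := if st.1.contains ch then (st.1, st.2.2)
                else (st.1.insert ch (PySem.Int.toStr st.2.2), st.2.2 + 1)
      (ec.1, st.2.1 ++ [ec.1.getD ch ""], ec.2))
    (PySem.Dict.empty, [], 0)
  PySem.Str.join "" st.2.1

-- ===== PORT B =====
-- str(len(set(word[:word.index(ch)]))) per character; word.index(ch) never raises
-- (ch is drawn from word), so the none branch is dead
def hashWord_alt (word : String) : String :=
  PySem.Str.join "" (word.toList.map (fun ch =>
    match PySem.List.index? word.toList ch with
    | some j => PySem.Int.toStr (((PySem.Set.ofList
        (PySem.List.slice word.toList none (some (j : Int)))).length : Int))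
    | none => ""))

-- ===== PRECONDITION & SPEC =====
def Spec_hashWord (word : String) (out : String) : Prop := out = hashWord_alt word
instance (word : String) (out : String) : Decidable (Spec_hashWord word out) := by unfold Spec_hashWord; infer_instance

-- ===== CLAIM (what is proved, stated in full; the proofs are below) =====
def Claim_equal_hashWord : Prop := ∀ (word : String), Dom_hashWord word → Spec_hashWord word (hashWord word)

-- ===== LEMMAS AND PROOFS =====

-- the per-character output of A, relative to the first-occurrence table u
def hwEntry (u : List Char) (ch : Char) : String :=
  match PySem.List.index? u ch with
  | some i => PySem.Int.toStr (i : Int)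
  | none => ""

theorem dedup_append_singleton {l : List Char} (x : Char) :
    PySem.List.dedup (l ++ [x]) =
      if x ∈ l then PySem.List.dedup l else PySem.List.dedup l ++ [x] := by
  have hstep : PySem.List.dedup (l ++ [x]) = PySem.Set.add (PySem.List.dedup l) x := by
    simp [PySem.List.dedup_eq_ofList, PySem.Set.ofList, List.foldl_append]
  rw [hstep, PySem.Set.add, PySem.Set.contains_eq_decide]
  by_cases hx : x ∈ l
  · rw [if_pos, if_pos hx]
    simp [PySem.List.dedup_eq_ofList, PySem.Set.mem_ofList, hx]
  · rw [if_neg, if_neg hx]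
    simp [PySem.List.dedup_eq_ofList, PySem.Set.mem_ofList, hx]

-- invariant of A's fold: after processing l, the dict maps each seen char to the string of
-- its index in dedup l, the counter is the number of distinct chars seen, and the output
-- list is the per-character entries relative to dedup l
theorem hashWord_fold_inv (l : List Char) :
    (l.foldl
      (fun (st : PySem.Dict Char String × List String × Int) ch =>
        let ec := if st.1.contains ch then (st.1, st.2.2)
                  else (st.1.insert ch (PySem.Int.toStr st.2.2), st.2.2 + 1)
        (ec.1, st.2.1 ++ [ec.1.getD ch ""], ec.2))
      (PySem.Dict.empty, [], 0)) =
    (PySem.Dict.mk ((PySem.List.dedup l).zipIdx.map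
        (fun p => (p.1, PySem.Int.toStr (p.2 : Int)))),
     l.map (hwEntry (PySem.List.dedup l)),
     ((PySem.List.dedup l).length : Int)) := by
  induction l using List.reverseRecOn with
  | nil => simp [PySem.List.dedup, PySem.Set.ofList]; rfl
  | append_singleton l x ih =>
    rw [List.foldl_append, ih]
    have hkeys : (PySem.Dict.mk ((PySem.List.dedup l).zipIdx.map
        (fun p : Char × Nat => (p.1, PySem.Int.toStr (p.2 : Int))))).keys = PySem.List.dedup l := by
      simp only [PySem.Dict.keys, List.map_map]
      exact List.zipIdx_map_fst 0 (PySem.List.dedup l)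
    have hcont : (PySem.Dict.mk ((PySem.List.dedup l).zipIdx.map
        (fun p : Char × Nat => (p.1, PySem.Int.toStr (p.2 : Int))))).contains x
        = decide (x ∈ l) := by
      rw [PySem.Dict.contains_eq_decide_mem_keys, hkeys]
      simp [PySem.List.mem_dedup]
    by_cases hx : x ∈ l
    · -- x already seen: dict, dedup and counter unchanged; one entry appended
      have hd : PySem.List.dedup (l ++ [x]) = PySem.List.dedup l := by
        rw [dedup_append_singleton x, if_pos hx]
      simp only [List.foldl_cons, List.foldl_nil, hcont, hx, decide_true, if_true, hd]
      simp only [Prod.mk.injEq, true_and, and_true]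
      rw [List.map_append]
      refine congrArg _ ?_
      -- the appended element: exists[x] = str(index of x in dedup l)
      cases hi : PySem.List.index? (PySem.List.dedup l) x with
      | none => exact absurd ((PySem.List.mem_dedup l x).mpr hx) ((PySem.List.index?_eq_none_iff _ _).mp hi)
      | some i =>
        obtain ⟨hk, hget, _⟩ := PySem.List.getElem_of_index?_eq_some hi
        have : (PySem.Dict.mk ((PySem.List.dedup l).zipIdx.map
            (fun p : Char × Nat => (p.1, PySem.Int.toStr (p.2 : Int))))).getD x ""
            = PySem.Int.toStr (i : Int) := by
          apply PySem.Dict.getD_of_mem_items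
          · simp only [PySem.Dict.items]
            exact List.mem_map.mpr ⟨((PySem.List.dedup l)[i], i),
              List.mem_zipIdx_iff_getElem?.mpr (by simp), by exact congrArg (fun c => (c, PySem.Int.toStr (i : Int))) hget⟩
          · rw [hkeys]; exact PySem.List.nodup_dedup l
        simp only [List.map_cons, List.map_nil, hwEntry, hi]
        rw [this]
    · -- x is new: dict gains (x, str(count)) at the end, counter increments
      have hd : PySem.List.dedup (l ++ [x]) = PySem.List.dedup l ++ [x] := by
        rw [dedup_append_singleton x, if_neg hx]
      have hxd : x ∉ PySem.List.dedup l := fun h => hx ((PySem.List.mem_dedup l x).mp h)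
      simp only [List.foldl_cons, List.foldl_nil, hcont, hx, decide_false, Bool.false_eq_true,
        if_false, hd]
      have hins : (PySem.Dict.mk ((PySem.List.dedup l).zipIdx.map
          (fun p : Char × Nat => (p.1, PySem.Int.toStr (p.2 : Int))))).insert x
            (PySem.Int.toStr ((PySem.List.dedup l).length : Int))
          = PySem.Dict.mk (((PySem.List.dedup l) ++ [x]).zipIdx.map
          (fun p : Char × Nat => (p.1, PySem.Int.toStr (p.2 : Int)))) := by
        apply PySem.Dict.ext
        rw [PySem.Dict.items_insert_of_not_contains _ _ (by rw [hcont]; simpa using hx)]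
        simp [PySem.Dict.items, List.zipIdx_append]
      rw [hins]
      simp only [Prod.mk.injEq, true_and, and_true]
      refine ⟨?_, by simp⟩
      rw [List.map_append]
      refine congrArg₂ _ ?_ ?_
      · -- old entries are stable: indices in dedup l survive the append
        apply List.map_congr_left
        intro ch hch
        have : PySem.List.index? (PySem.List.dedup l ++ [x]) ch
            = PySem.List.index? (PySem.List.dedup l) ch :=
          PySem.List.index?_append_of_mem _ ((PySem.List.mem_dedup l ch).mpr hch)
        simp only [hwEntry]
        rw [this]
      · -- new entry: index of x is the old distinct count
        have hidx := PySem.List.index?_append_singleton_self (PySem.List.dedup l) x hxd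
        have hg : (PySem.Dict.mk (((PySem.List.dedup l) ++ [x]).zipIdx.map
            (fun p : Char × Nat => (p.1, PySem.Int.toStr (p.2 : Int))))).getD x ""
            = PySem.Int.toStr ((PySem.List.dedup l).length : Int) := by
          apply PySem.Dict.getD_of_mem_items
          · simp only [PySem.Dict.items]
            refine List.mem_map.mpr ⟨(x, (PySem.List.dedup l).length),
              List.mem_zipIdx_iff_getElem?.mpr (by simp), rfl⟩
          · simp only [PySem.Dict.keys, List.map_map]
            show (((PySem.List.dedup l) ++ [x]).zipIdx.map Prod.fst).Nodup
            rw [List.zipIdx_map_fst 0 ((PySem.List.dedup l) ++ [x])]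
            simp [List.nodup_append, PySem.List.nodup_dedup, hxd]
            exact fun a ha h => hx (h ▸ ha)
        simp only [List.map_cons, List.map_nil, hwEntry, hidx]
        rw [hg]

-- dedup of an extended list extends dedup of the original: new chars are only appended
theorem dedup_append_exists (b a : List Char) :
    ∃ r, PySem.List.dedup (a ++ b) = PySem.List.dedup a ++ r := by
  induction b using List.reverseRecOn with
  | nil => exact ⟨[], by simp⟩
  | append_singleton b x ih =>
    obtain ⟨r, hr⟩ := ih
    rw [← List.append_assoc, dedup_append_singleton x]
    by_cases hx : x ∈ a ++ b
    · exact ⟨r, by rw [if_pos hx, hr]⟩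
    · exact ⟨r ++ [x], by rw [if_neg hx, hr, List.append_assoc]⟩

-- the bridge: the index of ch in dedup l is the number of distinct chars in the
-- prefix of l preceding ch's first occurrence
theorem index?_dedup_eq (l : List Char) (ch : Char) (j : Nat)
    (hj : PySem.List.index? l ch = some j) :
    PySem.List.index? (PySem.List.dedup l) ch
      = some (PySem.List.dedup (l.take j)).length := by
  obtain ⟨pre, suf, hl, hlen, hpre⟩ := (PySem.List.index?_eq_some_iff _ _ _).mp hj
  subst hl
  have htake : (pre ++ ch :: suf).take j = pre := by
    rw [← hlen, List.take_left]
  rw [htake]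
  have hpd : ch ∉ PySem.List.dedup pre := fun h => hpre ((PySem.List.mem_dedup pre ch).mp h)
  have hsplit : pre ++ ch :: suf = (pre ++ [ch]) ++ suf := by simp
  obtain ⟨r, hr⟩ := dedup_append_exists suf (pre ++ [ch])
  rw [hsplit, hr, dedup_append_singleton ch, if_neg hpre]
  rw [PySem.List.index?_append_of_mem _ (by simp : ch ∈ PySem.List.dedup pre ++ [ch])]
  exact PySem.List.index?_append_singleton_self _ _ hpd

-- ===== VERDICT (by name: the statement is the Claim_ definition above) =====
theorem hashWord_spec : Claim_equal_hashWord := by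
  intro word _
  unfold Spec_hashWord hashWord hashWord_alt
  rw [hashWord_fold_inv]
  show PySem.Str.join "" _ = PySem.Str.join "" _
  refine congrArg _ (List.map_congr_left ?_)
  intro ch hch
  cases hj : PySem.List.index? word.toList ch with
  | none => exact absurd hch ((PySem.List.index?_eq_none_iff _ _).mp hj)
  | some j =>
    simp only [hwEntry, index?_dedup_eq word.toList ch j hj]
    rw [PySem.List.slice_to_natCast]
    simp [PySem.List.dedup_eq_ofList]
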